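-- pv_equiv track=rewrite | github.com/dabmenez/biocomp | trab1/bacter_final.py | find_maximal_palindromes_of_length_k
-- ===== SOURCE A (Python) =====
-- from collections import defaultdict
--
-- COMP = str.maketrans("ACGTacgt", "TGCAtgca")
--
-- def rev_comp(s: str) -> str:
--     """Retorna o complemento reverso de uma sequência de DNA."""
--     return s.translate(COMP)[::-1]
--
-- def is_palindrome(s: str) -> bool:
--     """Verifica se uma sequência é um palíndromo (igual ao seu complemento reverso)."""
--     return s.upper() == rev_comp(s).upper()
--
-- def find_maximal_palindromes_of_length_k(seq, k):
--     """
--     Encontra todos os palíndromos maximais de tamanho exato k.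
--
--     Args:
--         seq (str): Sequência de DNA
--         k (int): Tamanho desejado dos palíndromos
--
--     Returns:
--         dict: {sequência_palíndromo: [posições_início_1based]}
--     """
--     n = len(seq)
--     found_positions = defaultdict(list)
--
--     for i in range(0, n - k + 1):
--         sub = seq[i:i+k]
--         if is_palindrome(sub):
--             # Verificar se é maximal (não pode ser estendido)
--             can_extend = False
--             if i > 0 and i + k < n:
--                 # Tentar estender para a esquerda e direita
--                 extended = seq[i-1:i+k+1]
--                 if is_palindrome(extended):
--                     can_extend = True
--
--             if not can_extend:
--                 found_positions[sub.upper()].append(i + 1)  # 1-based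
--
--     return found_positions
-- ===== SOURCE B (Python) =====
-- FLIP = {'A': 'T', 'C': 'G', 'G': 'C', 'T': 'A'}
--
-- def _expand(up, n, lo, hi):
--     """Maximal radius r such that positions (lo-t, hi+t) complement for all t < r."""
--     r = 0
--     while lo - r >= 0 and hi + r < n and FLIP.get(up[lo - r], up[lo - r]) == up[hi + r]:
--         r += 1
--     return r
--
-- def find_maximal_palindromes_of_length_k(seq, k):
--     """Expand-around-center: one maximal complement-radius per center; a window of
--     exact length k is a maximal reverse-complement palindrome iff its center's
--     radius equals exactly k//2 (>= k//2 means palindrome, >= k//2+1 means extendable)."""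
--     res = {}
--     if k < 0:
--         return res
--     n = len(seq)
--     up = seq.upper()
--     half = k // 2
--     for c in range(half, n - k + half + 1):
--         i = c - half
--         if k % 2 == 0:
--             r = _expand(up, n, c - 1, c)
--         else:
--             a = up[c]
--             if FLIP.get(a, a) != a:
--                 continue
--             r = _expand(up, n, c - 1, c + 1)
--         if r == half:
--             res.setdefault(up[i:i + k], []).append(i + 1)
--     return res
-- ===== Notes on version B (the rewrite author's own statement) =====
-- stated objective: alternative
-- what changed: A tests every length-k window by rebuilding, reverse-complementing and uppercasing the k-substring and then repeats the whole O(k) test on the (k+2)-extension; B is expand-around-center: it computes one maximal complement radius per window center by outward character expansion and reports the window iff that radius equals exactly k//2 (>= k//2 means palindrome, >= k//2+1 means extendable), doing no substring reverse-complement comparisons at all.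
-- outside the precondition, e.g. on find_maximal_palindromes_of_length_k('x', -1): A returns {'': [1, 3]}, B returns {}
import Mathlib
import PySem

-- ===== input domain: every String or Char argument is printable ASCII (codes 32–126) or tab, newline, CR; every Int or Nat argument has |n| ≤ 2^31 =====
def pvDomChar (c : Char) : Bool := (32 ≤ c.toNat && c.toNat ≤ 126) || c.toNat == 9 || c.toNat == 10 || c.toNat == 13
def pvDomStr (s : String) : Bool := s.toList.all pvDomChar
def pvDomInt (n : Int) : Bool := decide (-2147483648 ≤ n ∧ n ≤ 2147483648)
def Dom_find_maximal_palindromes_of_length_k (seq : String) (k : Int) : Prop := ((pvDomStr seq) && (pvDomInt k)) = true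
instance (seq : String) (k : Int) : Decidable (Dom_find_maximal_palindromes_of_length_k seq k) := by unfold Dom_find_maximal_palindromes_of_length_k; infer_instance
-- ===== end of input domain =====

-- B is a different algorithm (expand-around-center): one maximal complement radius per window
-- center, computed by outward character expansion; a window is reported iff its radius equals
-- exactly k//2, where A rebuilds, reverse-complements and uppercases the k-substring and the
-- (k+2)-extension at every window. Objective: alternative.

-- ===== PORT A =====

-- s.translate(COMP): charwise application of the 8-entry table (exact: COMP maps exactly these code points)
def pvCompChar (c : Char) : Char :=
  if c = 'A' then 'T' else if c = 'C' then 'G' else if c = 'G' then 'C' else if c = 'T' then 'A'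
  else if c = 'a' then 't' else if c = 'c' then 'g' else if c = 'g' then 'c' else if c = 't' then 'a'
  else c

-- rev_comp: s.translate(COMP)[::-1]  ([::-1] is List.reverse)
def rev_comp (s : List Char) : List Char := (s.map pvCompChar).reverse

-- is_palindrome: s.upper() == rev_comp(s).upper()
def is_palindrome (s : List Char) : Bool :=
  PySem.Chars.upper s == PySem.Chars.upper (rev_comp s)

def find_maximal_palindromes_of_length_k (seq : String) (k : Int) : List (String × List Int) :=
  let s := seq.toList
  let n : Int := PySem.List.len s
  (((PySem.List.pyRange 0 (n - k + 1) 1).foldl (fun d i =>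
      let sub := PySem.List.slice s (some i) (some (i + k))
      if is_palindrome sub then
        let can_extend : Bool :=
          if 0 < i ∧ i + k < n then
            is_palindrome (PySem.List.slice s (some (i - 1)) (some (i + k + 1)))
          else false
        if can_extend then d
        else d.modify (String.ofList (PySem.Chars.upper sub)) [] (· ++ [i + 1])
      else d)
    (PySem.Dict.empty : PySem.Dict String (List Int))).items)

-- ===== PORT B =====

-- FLIP.get(a, a) of Source B
def pvFlip (c : Char) : Char :=
  if c = 'A' then 'T' else if c = 'C' then 'G' else if c = 'G' then 'C' else if c = 'T' then 'A' else c

-- one character-pair complement test, Source B's 'FLIP.get(up[x], up[x]) == up[y]'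
-- (indices are in range wherever this is consulted, so pyGetD is exact)
def pvMt (u : List Char) (x y : Int) : Bool :=
  pvFlip (PySem.List.pyGetD u x ' ') == PySem.List.pyGetD u y ' '

-- the while-loop of _expand, as fuel recursion (fuel u.length+1 provably suffices: each
-- step needs lo - r ≥ 0, so at most lo+1 ≤ u.length steps are taken)
def pvExpandF (u : List Char) (lo hi : Int) (r fuel : Nat) : Nat :=
  match fuel with
  | 0 => r
  | f + 1 =>
    if 0 ≤ lo - (r : Int) ∧ hi + (r : Int) < (u.length : Int) ∧ pvMt u (lo - r) (hi + r) = true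
    then pvExpandF u lo hi (r + 1) f
    else r

-- _expand(up, n, lo, hi) of Source B
def pvExpand (u : List Char) (lo hi : Int) : Nat := pvExpandF u lo hi 0 (u.length + 1)

def find_maximal_palindromes_of_length_k_alt (seq : String) (k : Int) : List (String × List Int) :=
  let s := seq.toList
  if k < 0 then []
  else
    let n : Int := PySem.List.len s
    let u := PySem.Chars.upper s
    let half := PySem.Int.floordiv k 2
    (((PySem.List.pyRange half (n - k + half + 1) 1).foldl (fun d c =>
        let i := c - half
        if PySem.Int.mod k 2 = 0 then
          if ((pvExpand u (c - 1) c : Int) = half) then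
            d.modify (String.ofList (PySem.List.slice u (some i) (some (i + k)))) [] (· ++ [i + 1])
          else d
        else
          let a := PySem.List.pyGetD u c ' '
          if pvFlip a ≠ a then d
          else if ((pvExpand u (c - 1) (c + 1) : Int) = half) then
            d.modify (String.ofList (PySem.List.slice u (some i) (some (i + k)))) [] (· ++ [i + 1])
          else d)
      (PySem.Dict.empty : PySem.Dict String (List Int))).items)

-- ===== PRECONDITION & SPEC =====
-- Pre_ excludes negative k (a negative palindrome length, outside the function's natural
-- domain), where A's empty-slice arithmetic yields accidental positions past the string.
def Pre_find_maximal_palindromes_of_length_k (seq : String) (k : Int) : Prop := 0 ≤ k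
instance (seq : String) (k : Int) : Decidable (Pre_find_maximal_palindromes_of_length_k seq k) := by
  unfold Pre_find_maximal_palindromes_of_length_k; infer_instance

def pvWitness_find_maximal_palindromes_of_length_k : String × Int := ("GCATGC", 4)

def Spec_find_maximal_palindromes_of_length_k (seq : String) (k : Int) (out : List (String × List Int)) : Prop := out = find_maximal_palindromes_of_length_k_alt seq k
instance (seq : String) (k : Int) (out : List (String × List Int)) : Decidable (Spec_find_maximal_palindromes_of_length_k seq k out) := by unfold Spec_find_maximal_palindromes_of_length_k; infer_instance

-- ===== CLAIM =====
def Claim_equal_find_maximal_palindromes_of_length_k : Prop := ∀ (seq : String) (k : Int), Dom_find_maximal_palindromes_of_length_k seq k → Pre_find_maximal_palindromes_of_length_k seq k → Spec_find_maximal_palindromes_of_length_k seq k (find_maximal_palindromes_of_length_k seq k)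

-- ===== LEMMAS AND PROOFS =====

theorem pvFlip_invol (c : Char) : pvFlip (pvFlip c) = c := by
  unfold pvFlip; split_ifs <;> simp_all

theorem pvFlip_eq_comm (a b : Char) : pvFlip a = b ↔ pvFlip b = a := by
  constructor <;> (rintro rfl; exact pvFlip_invol _)

theorem pvMt_symm (u : List Char) (x y : Int) : pvMt u x y = pvMt u y x := by
  unfold pvMt
  rw [Bool.eq_iff_iff]
  simp only [beq_iff_eq]
  exact pvFlip_eq_comm _ _

theorem pvMt_cast (u : List Char) {x x' y y' : Int} (hx : x' = x) (hy : y' = y)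
    (h : pvMt u x y = true) : pvMt u x' y' = true := by rw [hx, hy]; exact h

theorem pvUpperCompAux : ∀ n : Nat, n < 128 →
    PySem.Chars.upperChar (pvCompChar (Char.ofNat n)) = pvFlip (PySem.Chars.upperChar (Char.ofNat n)) := by decide

theorem pvUpperComp (c : Char) (h : pvDomChar c = true) :
    PySem.Chars.upperChar (pvCompChar c) = pvFlip (PySem.Chars.upperChar c) := by
  have h1 : c.toNat < 128 := by simp [pvDomChar] at h; omega
  rw [← Char.ofNat_toNat c]
  exact pvUpperCompAux c.toNat h1

theorem pvUpper_slice (s : List Char) (a b : Option Int) :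
    PySem.Chars.upper (PySem.List.slice s a b) = PySem.List.slice (PySem.Chars.upper s) a b := by
  simp [PySem.Chars.upper, PySem.List.slice, List.map_take, List.map_drop]

theorem pvUpperLen (s : List Char) : (PySem.Chars.upper s).length = s.length := by
  simp [PySem.Chars.upper]

theorem pvMt_getElem (u : List Char) (x y : Int) (p q : Nat) (hx : x = (p : Int)) (hy : y = (q : Int))
    (hp : p < u.length) (hq : q < u.length) :
    (pvMt u x y = true ↔ pvFlip (u[p]'hp) = u[q]'hq) := by
  subst hx hy
  unfold pvMt
  rw [PySem.List.pyGetD_eq_getElem u ' ' (by omega) (by exact_mod_cast Nat.cast_lt.mpr hp),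
      PySem.List.pyGetD_eq_getElem u ' ' (by omega) (by exact_mod_cast Nat.cast_lt.mpr hq), beq_iff_eq]
  simp

theorem pvSlice_drop_take (u : List Char) (i k : Int) (hi : 0 ≤ i) (hk : 0 ≤ k) :
    PySem.List.slice u (some i) (some (i + k)) = (u.drop i.toNat).take k.toNat := by
  rw [PySem.List.slice_toNat u hi (by omega)]
  congr 1
  omega

-- "the window [i, i+k) of u is a reverse-complement palindrome", pairwise
def pvPalW (u : List Char) (i k : Int) : Prop :=
  ∀ j : Nat, (j : Int) < k → pvMt u (i + j) (i + k - 1 - j) = true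

theorem pvVrev_iff (u : List Char) (i k : Int) (hi : 0 ≤ i) (hk : 0 ≤ k)
    (hn : i + k ≤ (u.length : Int)) :
    ((PySem.List.slice u (some i) (some (i + k)) =
        ((PySem.List.slice u (some i) (some (i + k))).map pvFlip).reverse) ↔ pvPalW u i k) := by
  rw [pvSlice_drop_take u i k hi hk]
  set a := i.toNat with ha
  set m := k.toNat with hm
  set v := (u.drop a).take m with hv
  have hvm : v.length = m := by simp [hv]; omega
  have hvget : ∀ (j : Nat) (hj : j < m), v[j]'(by omega) = u[a + j]'(by omega) := by
    intro j hj
    simp [hv, List.getElem_take, List.getElem_drop]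
  constructor
  · intro hEq j hj
    have hjm : j < m := by omega
    rw [pvMt_getElem u (i + j) (i + k - 1 - j) (a + j) (a + (m - 1 - j))
      (by push_cast; omega) (by push_cast; omega) (by omega) (by omega)]
    have h1 : (m - 1 - j) < m := by omega
    have := List.getElem_of_eq hEq (by omega : m - 1 - j < v.length)
    rw [List.getElem_reverse, List.getElem_map] at this
    simp only [List.length_map, hvm] at this
    have hidx : m - 1 - (m - 1 - j) = j := by omega
    rw [hvget _ h1] at this
    simp only [hidx] at this
    rw [hvget j hjm] at this
    exact this.symm
  · intro hp
    apply List.ext_getElem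
    · simp [hvm]
    · intro j h1 h2
      rw [List.getElem_reverse, List.getElem_map]
      have hjm : j < m := by omega
      simp only [List.length_map, hvm]
      have h2' : m - 1 - j < m := by omega
      rw [hvget j hjm, hvget _ h2']
      have := hp (m - 1 - j) (by omega)
      rw [pvMt_getElem u _ _ (a + (m - 1 - j)) (a + j)
        (by push_cast; omega) (by push_cast; omega) (by omega) (by omega)] at this
      exact this.symm

theorem pvPal_iff (s : List Char) (hdom : s.all pvDomChar = true) (i k : Int)
    (hi : 0 ≤ i) (hk : 0 ≤ k) (hn : i + k ≤ (s.length : Int)) :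
    (is_palindrome (PySem.List.slice s (some i) (some (i + k))) = true ↔
      pvPalW (PySem.Chars.upper s) i k) := by
  set u := PySem.Chars.upper s with hu
  have hlen : u.length = s.length := pvUpperLen s
  have hval := pvVrev_iff u i k hi hk (by rw [hlen]; exact hn)
  set a := i.toNat with ha
  set m := k.toNat with hm
  have hvmap : PySem.Chars.upper ((s.drop a).take m) = (u.drop a).take m := by
    simp [hu, PySem.Chars.upper, List.map_take, List.map_drop]
  have hrc : PySem.Chars.upper (rev_comp ((s.drop a).take m)) =
      (((u.drop a).take m).map pvFlip).reverse := by
    unfold rev_comp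
    simp only [PySem.Chars.upper, List.map_reverse, List.map_map]
    congr 1
    rw [← hvmap]
    simp only [PySem.Chars.upper, List.map_map]
    apply List.map_congr_left
    intro c hc
    have hcs : c ∈ s := List.mem_of_mem_drop (List.mem_of_mem_take hc)
    have : pvDomChar c = true := by
      rw [List.all_eq_true] at hdom
      exact hdom c hcs
    simp [Function.comp, pvUpperComp c this]
  rw [pvSlice_drop_take s i k hi hk]
  unfold is_palindrome
  rw [beq_iff_eq, hvmap, hrc]
  rw [pvSlice_drop_take u i k hi hk] at hval
  exact hval

-- the expansion guard of _expand, as a predicate on the radius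
def pvCond (u : List Char) (lo hi : Int) (t : Nat) : Prop :=
  0 ≤ lo - (t : Int) ∧ hi + (t : Int) < (u.length : Int) ∧ pvMt u (lo - t) (hi + t) = true

-- "all t < h flanking pairs around (lo, hi) complement"
def pvPairs (u : List Char) (lo hi : Int) (h : Nat) : Prop :=
  ∀ t : Nat, t < h → pvMt u (lo - t) (hi + t) = true

theorem pvExpandF_spec (u : List Char) (lo hi : Int) :
    ∀ (fuel r : Nat), lo < (r : Int) + (fuel : Int) →
      r ≤ pvExpandF u lo hi r fuel ∧
      (∀ t : Nat, r ≤ t → t < pvExpandF u lo hi r fuel → pvCond u lo hi t) ∧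
      ¬ pvCond u lo hi (pvExpandF u lo hi r fuel) := by
  intro fuel
  induction fuel with
  | zero =>
    intro r hr
    unfold pvExpandF
    refine ⟨le_refl _, fun t h1 h2 => absurd h2 (by omega), ?_⟩
    rintro ⟨h1, -, -⟩
    simp only [Nat.cast_zero] at hr
    omega
  | succ f ih =>
    intro r hr
    unfold pvExpandF
    by_cases hc : 0 ≤ lo - (r : Int) ∧ hi + (r : Int) < (u.length : Int) ∧ pvMt u (lo - r) (hi + r) = true
    · rw [if_pos hc]
      obtain ⟨h1, h2, h3⟩ := ih (r + 1) (by push_cast at hr ⊢; omega)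
      refine ⟨by omega, fun t ht1 ht2 => ?_, h3⟩
      rcases Nat.lt_or_ge t (r + 1) with hlt | hge
      · have : t = r := by omega
        subst this
        exact hc
      · exact h2 t hge ht2
    · rw [if_neg hc]
      exact ⟨le_refl _, fun t h1 h2 => absurd h2 (by omega), hc⟩

theorem pvExpand_spec (u : List Char) (lo hi : Int) (hlo : lo ≤ (u.length : Int)) :
    (∀ t : Nat, t < pvExpand u lo hi → pvCond u lo hi t) ∧
      ¬ pvCond u lo hi (pvExpand u lo hi) := by
  obtain ⟨-, h2, h3⟩ := pvExpandF_spec u lo hi (u.length + 1) 0 (by push_cast; omega)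
  exact ⟨fun t ht => h2 t (Nat.zero_le t) ht, h3⟩

theorem pvExpand_ge_iff (u : List Char) (lo hi : Int) (hlo : lo ≤ (u.length : Int)) (h : Nat)
    (Hb : ∀ t : Nat, t < h → 0 ≤ lo - (t : Int) ∧ hi + (t : Int) < (u.length : Int)) :
    (h ≤ pvExpand u lo hi ↔ pvPairs u lo hi h) := by
  obtain ⟨h1, h2⟩ := pvExpand_spec u lo hi hlo
  constructor
  · intro hge t ht
    exact (h1 t (by omega)).2.2
  · intro hp
    by_contra hlt
    push_neg at hlt
    exact h2 ⟨(Hb _ hlt).1, (Hb _ hlt).2, hp _ hlt⟩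

theorem pvExpand_succ_iff (u : List Char) (lo hi : Int) (hlo : lo ≤ (u.length : Int)) (h : Nat)
    (Hb : ∀ t : Nat, t < h → 0 ≤ lo - (t : Int) ∧ hi + (t : Int) < (u.length : Int)) :
    (h + 1 ≤ pvExpand u lo hi ↔
      (0 ≤ lo - (h : Int) ∧ hi + (h : Int) < (u.length : Int) ∧ pvPairs u lo hi (h + 1))) := by
  obtain ⟨h1, h2⟩ := pvExpand_spec u lo hi hlo
  constructor
  · intro hge
    obtain ⟨c1, c2, -⟩ := h1 h (by omega)
    exact ⟨c1, c2, fun t ht => (h1 t (by omega)).2.2⟩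
  · rintro ⟨b1, b2, hp⟩
    have hh : h ≤ pvExpand u lo hi := by
      rw [pvExpand_ge_iff u lo hi hlo h Hb]
      exact fun t ht => hp t (by omega)
    by_contra hlt
    push_neg at hlt
    have : pvExpand u lo hi = h := by omega
    rw [this] at h2
    exact h2 ⟨b1, b2, hp h (by omega)⟩

-- the even window [i, i+2h) as flank pairs around the center (i+h-1, i+h)
theorem pvPal_even (u : List Char) (i : Int) (h : Nat) :
    pvPalW u i (2 * h) ↔ pvPairs u (i + h - 1) (i + h) h := by
  constructor
  · intro H t ht
    exact pvMt_cast u (by push_cast; omega) (by push_cast; omega)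
      (H (h - 1 - t) (by push_cast; omega))
  · intro H j hj
    have hj' : j < 2 * h := by exact_mod_cast hj
    rcases Nat.lt_or_ge j h with hlt | hge
    · exact pvMt_cast u (by push_cast; omega) (by push_cast; omega) (H (h - 1 - j) (by omega))
    · have := H (j - h) (by omega)
      rw [pvMt_symm] at this
      exact pvMt_cast u (by push_cast; omega) (by push_cast; omega) this

-- the odd window [i, i+2h+1): a self-complementary middle and flank pairs around (i+h-1, i+h+1)
theorem pvPal_odd (u : List Char) (i : Int) (h : Nat) :
    pvPalW u i (2 * h + 1) ↔
      (pvMt u (i + h) (i + h) = true ∧ pvPairs u (i + h - 1) (i + h + 1) h) := by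
  constructor
  · intro H
    refine ⟨pvMt_cast u (by push_cast; omega) (by push_cast; omega)
      (H h (by push_cast; omega)), fun t ht => ?_⟩
    exact pvMt_cast u (by push_cast; omega) (by push_cast; omega)
      (H (h - 1 - t) (by push_cast; omega))
  · rintro ⟨hm, H⟩ j hj
    have hj' : j < 2 * h + 1 := by exact_mod_cast hj
    rcases Nat.lt_trichotomy j h with hlt | heq | hgt
    · exact pvMt_cast u (by push_cast; omega) (by push_cast; omega) (H (h - 1 - j) (by omega))
    · subst heq
      exact pvMt_cast u (by push_cast; omega) (by push_cast; omega) hm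
    · have := H (j - h - 1) (by omega)
      rw [pvMt_symm] at this
      exact pvMt_cast u (by push_cast; omega) (by push_cast; omega) this


-- A's per-window test-and-record equals B's exact-radius test, even length 2h
theorem pvBodyEven (s : List Char) (hd : s.all pvDomChar = true) (h : Nat) (i : Int)
    (hi : 0 ≤ i) (hin : i + 2 * (h : Int) ≤ (s.length : Int)) (acc : PySem.Dict String (List Int)) :
    (if is_palindrome (PySem.List.slice s (some i) (some (i + 2 * (h : Int)))) = true then
       if (if 0 < i ∧ i + 2 * (h : Int) < (s.length : Int) then
            is_palindrome (PySem.List.slice s (some (i - 1)) (some (i + 2 * (h : Int) + 1)))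
          else false) = true
       then acc
       else acc.modify (String.ofList (PySem.Chars.upper (PySem.List.slice s (some i) (some (i + 2 * (h : Int)))))) [] (· ++ [i + 1])
     else acc) =
    (if ((pvExpand (PySem.Chars.upper s) ((h : Int) + i - 1) ((h : Int) + i) : Int) = (h : Int)) then
       acc.modify (String.ofList (PySem.List.slice (PySem.Chars.upper s) (some i) (some (i + 2 * (h : Int))))) [] (· ++ [i + 1])
     else acc) := by
  rw [show (h : Int) + i - 1 = i + (h : Int) - 1 from by ring, show (h : Int) + i = i + (h : Int) from by ring]
  set u := PySem.Chars.upper s with hu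
  have hlen : (u.length : Int) = (s.length : Int) := by exact_mod_cast pvUpperLen s
  set lo := i + (h : Int) - 1 with hlo
  set hi' := i + (h : Int) with hhi
  have hloB : lo ≤ (u.length : Int) := by omega
  have Hb : ∀ t : Nat, t < h → 0 ≤ lo - (t : Int) ∧ hi' + (t : Int) < (u.length : Int) := by
    intro t ht
    constructor <;> push_cast <;> omega
  set R := pvExpand u lo hi' with hR
  have hpal : is_palindrome (PySem.List.slice s (some i) (some (i + 2 * (h : Int)))) = true ↔ h ≤ R := by
    rw [show (2 * (h : Int)) = ((2 * h : Nat) : Int) from by push_cast; ring]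
    rw [pvPal_iff s hd i ((2 * h : Nat) : Int) hi (by positivity) (by push_cast; omega)]
    rw [show ((( 2 * h : Nat) : Int)) = 2 * (h : Int) from by push_cast; ring]
    rw [pvPal_even u i h]
    exact (pvExpand_ge_iff u lo hi' hloB h Hb).symm
  have hpalext : 0 < i → i + 2 * (h : Int) < (s.length : Int) →
      (is_palindrome (PySem.List.slice s (some (i - 1)) (some (i + 2 * (h : Int) + 1))) = true ↔
        pvPairs u lo hi' (h + 1)) := by
    intro hb1 hb2
    rw [show i + 2 * (h : Int) + 1 = (i - 1) + ((2 * (h + 1) : Nat) : Int) from by push_cast; ring]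
    rw [pvPal_iff s hd (i - 1) _ (by omega) (by positivity) (by push_cast; omega)]
    rw [show (((2 * (h + 1) : Nat)) : Int) = 2 * (((h + 1 : Nat)) : Int) from by push_cast; ring]
    rw [pvPal_even u (i - 1) (h + 1)]
    rw [show (i - 1) + (((h + 1 : Nat)) : Int) - 1 = lo from by push_cast; omega,
        show (i - 1) + (((h + 1 : Nat)) : Int) = hi' from by push_cast; omega]
  have hext : ((0 < i ∧ i + 2 * (h : Int) < (s.length : Int)) ∧
      is_palindrome (PySem.List.slice s (some (i - 1)) (some (i + 2 * (h : Int) + 1))) = true) ↔ h + 1 ≤ R := by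
    rw [pvExpand_succ_iff u lo hi' hloB h Hb]
    constructor
    · rintro ⟨⟨b1, b2⟩, hp⟩
      exact ⟨by omega, by omega, (hpalext b1 b2).mp hp⟩
    · rintro ⟨c1, c2, hp⟩
      have b1 : 0 < i := by omega
      have b2 : i + 2 * (h : Int) < (s.length : Int) := by omega
      exact ⟨⟨b1, b2⟩, (hpalext b1 b2).mpr hp⟩
  by_cases hRh : ((R : Int) = (h : Int))
  · have hReq : R = h := by exact_mod_cast hRh
    rw [if_pos hRh, if_pos (hpal.mpr (by omega))]
    have hextF : (if 0 < i ∧ i + 2 * (h : Int) < (s.length : Int) then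
        is_palindrome (PySem.List.slice s (some (i - 1)) (some (i + 2 * (h : Int) + 1)))
      else false) = false := by
      by_cases hb : 0 < i ∧ i + 2 * (h : Int) < (s.length : Int)
      · rw [if_pos hb]
        rcases hq : is_palindrome (PySem.List.slice s (some (i - 1)) (some (i + 2 * (h : Int) + 1))) with _ | _
        · rfl
        · exact absurd (hext.mp ⟨hb, hq⟩) (by omega)
      · rw [if_neg hb]
    rw [hextF, if_neg (Bool.false_ne_true), pvUpper_slice]
  · rw [if_neg hRh]
    have hRne : R ≠ h := fun hq => hRh (by exact_mod_cast hq)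
    rcases Nat.lt_or_ge R h with hlt | hge
    · rw [if_neg (show ¬ is_palindrome (PySem.List.slice s (some i) (some (i + 2 * (h : Int)))) = true from
        fun hq => by have := hpal.mp hq; omega)]
    · obtain ⟨⟨b1, b2⟩, hpe⟩ := hext.mpr (by omega)
      rw [if_pos (hpal.mpr (by omega)), if_pos (show 0 < i ∧ i + 2 * (h : Int) < (s.length : Int) from ⟨b1, b2⟩),
          if_pos hpe]

-- A's per-window test-and-record equals B's middle-test + exact-radius test, odd length 2h+1
theorem pvBodyOdd (s : List Char) (hd : s.all pvDomChar = true) (h : Nat) (i : Int)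
    (hi : 0 ≤ i) (hin : i + (2 * (h : Int) + 1) ≤ (s.length : Int)) (acc : PySem.Dict String (List Int)) :
    (if is_palindrome (PySem.List.slice s (some i) (some (i + (2 * (h : Int) + 1)))) = true then
       if (if 0 < i ∧ i + (2 * (h : Int) + 1) < (s.length : Int) then
            is_palindrome (PySem.List.slice s (some (i - 1)) (some (i + (2 * (h : Int) + 1) + 1)))
          else false) = true
       then acc
       else acc.modify (String.ofList (PySem.Chars.upper (PySem.List.slice s (some i) (some (i + (2 * (h : Int) + 1)))))) [] (· ++ [i + 1])
     else acc) =
    (if pvFlip (PySem.List.pyGetD (PySem.Chars.upper s) ((h : Int) + i) ' ') ≠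
          PySem.List.pyGetD (PySem.Chars.upper s) ((h : Int) + i) ' ' then acc
     else if ((pvExpand (PySem.Chars.upper s) ((h : Int) + i - 1) ((h : Int) + i + 1) : Int) = (h : Int)) then
       acc.modify (String.ofList (PySem.List.slice (PySem.Chars.upper s) (some i) (some (i + (2 * (h : Int) + 1))))) [] (· ++ [i + 1])
     else acc) := by
  rw [show (h : Int) + i - 1 = i + (h : Int) - 1 from by ring, show (h : Int) + i + 1 = i + (h : Int) + 1 from by ring,
      show (h : Int) + i = i + (h : Int) from by ring]
  set u := PySem.Chars.upper s with hu
  have hlen : (u.length : Int) = (s.length : Int) := by exact_mod_cast pvUpperLen s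
  set lo := i + (h : Int) - 1 with hlo
  set hi' := i + (h : Int) + 1 with hhi
  have hloB : lo ≤ (u.length : Int) := by omega
  have Hb : ∀ t : Nat, t < h → 0 ≤ lo - (t : Int) ∧ hi' + (t : Int) < (u.length : Int) := by
    intro t ht
    constructor <;> push_cast <;> omega
  set R := pvExpand u lo hi' with hR
  have hmidB : (pvFlip (PySem.List.pyGetD u (i + (h : Int)) ' ') ≠ PySem.List.pyGetD u (i + (h : Int)) ' ') ↔
      ¬ (pvMt u (i + (h : Int)) (i + (h : Int)) = true) := by
    unfold pvMt
    simp [beq_iff_eq]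
  have hpal : is_palindrome (PySem.List.slice s (some i) (some (i + (2 * (h : Int) + 1)))) = true ↔
      (pvMt u (i + (h : Int)) (i + (h : Int)) = true ∧ pvPairs u lo hi' h) := by
    rw [show (2 * (h : Int) + 1) = ((2 * h + 1 : Nat) : Int) from by push_cast; ring]
    rw [pvPal_iff s hd i ((2 * h + 1 : Nat) : Int) hi (by positivity) (by push_cast; omega)]
    rw [show (((2 * h + 1 : Nat)) : Int) = 2 * (h : Int) + 1 from by push_cast; ring]
    rw [pvPal_odd u i h]
  have hpalext : 0 < i → i + (2 * (h : Int) + 1) < (s.length : Int) →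
      (is_palindrome (PySem.List.slice s (some (i - 1)) (some (i + (2 * (h : Int) + 1) + 1))) = true ↔
        (pvMt u (i + (h : Int)) (i + (h : Int)) = true ∧ pvPairs u lo hi' (h + 1))) := by
    intro hb1 hb2
    rw [show i + (2 * (h : Int) + 1) + 1 = (i - 1) + ((2 * (h + 1) + 1 : Nat) : Int) from by push_cast; ring]
    rw [pvPal_iff s hd (i - 1) _ (by omega) (by positivity) (by push_cast; omega)]
    rw [show (((2 * (h + 1) + 1 : Nat)) : Int) = 2 * (((h + 1 : Nat)) : Int) + 1 from by push_cast; ring]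
    rw [pvPal_odd u (i - 1) (h + 1)]
    rw [show (i - 1) + (((h + 1 : Nat)) : Int) - 1 = lo from by push_cast; omega,
        show (i - 1) + (((h + 1 : Nat)) : Int) + 1 = hi' from by push_cast; omega,
        show (i - 1) + (((h + 1 : Nat)) : Int) = i + (h : Int) from by push_cast; omega]
  by_cases hmid : pvMt u (i + (h : Int)) (i + (h : Int)) = true
  · rw [if_neg (fun hq => (hmidB.mp hq) hmid)]
    have hext : ((0 < i ∧ i + (2 * (h : Int) + 1) < (s.length : Int)) ∧
        is_palindrome (PySem.List.slice s (some (i - 1)) (some (i + (2 * (h : Int) + 1) + 1))) = true) ↔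
        h + 1 ≤ R := by
      rw [pvExpand_succ_iff u lo hi' hloB h Hb]
      constructor
      · rintro ⟨⟨b1, b2⟩, hp⟩
        exact ⟨by omega, by omega, ((hpalext b1 b2).mp hp).2⟩
      · rintro ⟨c1, c2, hp⟩
        have b1 : 0 < i := by omega
        have b2 : i + (2 * (h : Int) + 1) < (s.length : Int) := by omega
        exact ⟨⟨b1, b2⟩, (hpalext b1 b2).mpr ⟨hmid, hp⟩⟩
    have hpal' : is_palindrome (PySem.List.slice s (some i) (some (i + (2 * (h : Int) + 1)))) = true ↔ h ≤ R := by
      rw [hpal, pvExpand_ge_iff u lo hi' hloB h Hb]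
      exact ⟨fun hq => hq.2, fun hq => ⟨hmid, hq⟩⟩
    by_cases hRh : ((R : Int) = (h : Int))
    · have hReq : R = h := by exact_mod_cast hRh
      rw [if_pos hRh, if_pos (hpal'.mpr (by omega))]
      have hextF : (if 0 < i ∧ i + (2 * (h : Int) + 1) < (s.length : Int) then
          is_palindrome (PySem.List.slice s (some (i - 1)) (some (i + (2 * (h : Int) + 1) + 1)))
        else false) = false := by
        by_cases hb : 0 < i ∧ i + (2 * (h : Int) + 1) < (s.length : Int)
        · rw [if_pos hb]
          rcases hq : is_palindrome (PySem.List.slice s (some (i - 1)) (some (i + (2 * (h : Int) + 1) + 1))) with _ | _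
          · rfl
          · exact absurd (hext.mp ⟨hb, hq⟩) (by omega)
        · rw [if_neg hb]
      rw [hextF, if_neg (Bool.false_ne_true), pvUpper_slice]
    · rw [if_neg hRh]
      have hRne : R ≠ h := fun hq => hRh (by exact_mod_cast hq)
      rcases Nat.lt_or_ge R h with hlt | hge
      · rw [if_neg (show ¬ is_palindrome (PySem.List.slice s (some i) (some (i + (2 * (h : Int) + 1)))) = true from
          fun hq => by have := hpal'.mp hq; omega)]
      · obtain ⟨⟨b1, b2⟩, hpe⟩ := hext.mpr (by omega)
        rw [if_pos (hpal'.mpr (by omega)),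
            if_pos (show 0 < i ∧ i + (2 * (h : Int) + 1) < (s.length : Int) from ⟨b1, b2⟩), if_pos hpe]
  · rw [if_pos (hmidB.mpr hmid),
        if_neg (show ¬ is_palindrome (PySem.List.slice s (some i) (some (i + (2 * (h : Int) + 1)))) = true from
          fun hq => hmid (hpal.mp hq).1)]

-- ===== VERDICT =====
theorem find_maximal_palindromes_of_length_k_spec : Claim_equal_find_maximal_palindromes_of_length_k := by
  intro seq k hdom hpre
  unfold Spec_find_maximal_palindromes_of_length_k
  have hd : seq.toList.all pvDomChar = true := by
    unfold Dom_find_maximal_palindromes_of_length_k pvDomStr at hdom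
    simp only [Bool.and_eq_true] at hdom
    exact hdom.1
  have hk0 : 0 ≤ k := hpre
  obtain ⟨kn, hkn⟩ : ∃ kn : Nat, k = (kn : Int) := ⟨k.toNat, by omega⟩
  subst hkn
  unfold find_maximal_palindromes_of_length_k find_maximal_palindromes_of_length_k_alt
  simp only [PySem.List.len_eq]
  set s := seq.toList with hs
  rw [if_neg (show ¬ (kn : Int) < 0 from Int.not_lt.mpr (Int.natCast_nonneg kn))]
  have hfloor : PySem.Int.floordiv (kn : Int) 2 = ((kn / 2 : Nat) : Int) := by
    exact_mod_cast PySem.Int.floordiv_natCast kn 2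
  rw [hfloor]
  set h : Nat := kn / 2 with hh
  rw [show ((s.length : Int)) - (kn : Int) + ((h : Nat) : Int) + 1 = ((h : Nat) : Int) + (((s.length : Int)) - (kn : Int) + 1) from by ring]
  rw [PySem.List.pyRange_one, PySem.List.pyRange_one]
  simp only [add_sub_cancel_left, Int.sub_zero, zero_add]
  rw [List.foldl_map, List.foldl_map]
  refine congrArg PySem.Dict.items (PySem.List.foldl_congr_mem _ _ _ _ ?_)
  intro acc j hj
  have hjN : (j : Int) < ((s.length : Int)) - (kn : Int) + 1 := by
    have := List.mem_range.mp hj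
    omega
  have hmod : PySem.Int.mod (kn : Int) 2 = ((kn % 2 : Nat) : Int) := by
    exact_mod_cast PySem.Int.mod_natCast kn 2
  simp only [add_sub_cancel_left, hmod]
  rcases Nat.even_or_odd kn with he | ho
  · have he0 : kn % 2 = 0 := Nat.even_iff.mp he
    have hk2 : (kn : Int) = 2 * (h : Int) := by omega
    rw [if_pos (show ((kn % 2 : Nat) : Int) = 0 from by rw [he0]; rfl)]
    rw [hk2]
    exact pvBodyEven s hd h (j : Int) (Int.natCast_nonneg j) (by omega) acc
  · have ho1 : kn % 2 = 1 := Nat.odd_iff.mp ho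
    have hk2 : (kn : Int) = 2 * (h : Int) + 1 := by omega
    rw [if_neg (show ¬ ((kn % 2 : Nat) : Int) = 0 from by rw [ho1]; omega)]
    rw [hk2]
    exact pvBodyOdd s hd h (j : Int) (Int.natCast_nonneg j) (by omega) acc
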